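-- pv_equiv track=rewrite | github.com/kadumel/SisEvol | cardapio/management/commands/normalize_categorias_visual.py | suggest_icon
-- ===== SOURCE A (Python) =====
-- def suggest_icon(name: str) -> str:
-- 	n = (name or "").lower()
-- 	if any(k in n for k in ["entrada", "bruschetta", "pao", "camar", "polvo"]):
-- 		return "bi-egg"
-- 	if any(k in n for k in ["sobremesa", "sobremesas", "doce", "torta", "sorvete", "pudim", "chocolate"]):
-- 		return "bi-cup-hot"
-- 	if any(k in n for k in ["salada", "saladas", "folha", "veg", "burrata"]):
-- 		return "bi-flower1"
-- 	if any(k in n for k in ["bovino", "carne", "cortes", "steak", "picanha", "maminha", "ancho", "rib", "denver", "parrilla", "parrila"]):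
-- 		return "bi-fire"
-- 	if any(k in n for k in ["peixe", "salm", "frutos do mar", "polvo"]):
-- 		return "bi-fish"
-- 	if any(k in n for k in ["ave", "frango", "galetinho"]):
-- 		return "bi-egg"
-- 	if any(k in n for k in ["suin", "porco", "barriga", "prime rib su"]):
-- 		return "bi-pig"
-- 	if any(k in n for k in ["lingui", "embutido"]):
-- 		return "bi-emoji-smile"
-- 	if any(k in n for k in ["acompanh", "guarni", "side"]):
-- 		return "bi-basket"
-- 	if any(k in n for k in ["kids", "infantil"]):
-- 		return "bi-emoji-smile"
-- 	if any(k in n for k in ["lanche", "burger", "sand"]):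
-- 		return "bi-bag"
-- 	if any(k in n for k in ["executivo", "prato do dia"]):
-- 		return "bi-briefcase"
-- 	if any(k in n for k in ["wagyu"]):
-- 		return "bi-gem"
-- 	if any(k in n for k in ["compartilhar", "tabua", "familia"]):
-- 		return "bi-people"
-- 	return "bi-grid-3x3-gap"
-- ===== SOURCE B (Python) =====
-- # Inverted index: keyword -> priority (rule rank, 0 = highest).  Kept in
-- # alphabetical order because order is irrelevant here: instead of trying the
-- # rules one by one and stopping at the first hit, we scan every keyword and
-- # keep the best (lowest) priority seen, then look the icon up by priority.
-- ICONS = ['bi-egg', 'bi-cup-hot', 'bi-flower1', 'bi-fire', 'bi-fish', 'bi-egg',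
--          'bi-pig', 'bi-emoji-smile', 'bi-basket', 'bi-emoji-smile', 'bi-bag',
--          'bi-briefcase', 'bi-gem', 'bi-people']
--
-- KEYWORD_PRIORITY = [
--     ("acompanh", 8), ("ancho", 3), ("ave", 5), ("barriga", 6), ("bovino", 3),
--     ("bruschetta", 0), ("burger", 10), ("burrata", 2), ("camar", 0), ("carne", 3),
--     ("chocolate", 1), ("compartilhar", 13), ("cortes", 3), ("denver", 3), ("doce", 1),
--     ("embutido", 7), ("entrada", 0), ("executivo", 11), ("familia", 13), ("folha", 2),
--     ("frango", 5), ("frutos do mar", 4), ("galetinho", 5), ("guarni", 8), ("infantil", 9),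
--     ("kids", 9), ("lanche", 10), ("lingui", 7), ("maminha", 3), ("pao", 0),
--     ("parrila", 3), ("parrilla", 3), ("peixe", 4), ("picanha", 3), ("polvo", 0),
--     ("polvo", 4), ("porco", 6), ("prato do dia", 11), ("prime rib su", 6), ("pudim", 1),
--     ("rib", 3), ("salada", 2), ("saladas", 2), ("salm", 4), ("sand", 10),
--     ("side", 8), ("sobremesa", 1), ("sobremesas", 1), ("sorvete", 1), ("steak", 3),
--     ("suin", 6), ("tabua", 13), ("torta", 1), ("veg", 2), ("wagyu", 12),
-- ]
--
--
-- def suggest_icon(name: str) -> str: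
--     n = (name or "").lower()
--     best = len(ICONS)
--     for k, i in KEYWORD_PRIORITY:
--         if k in n and i < best:
--             best = i
--     return ICONS[best] if best < len(ICONS) else "bi-grid-3x3-gap"
-- ===== Notes on version B (the rewrite author's own statement) =====
-- stated objective: alternative
-- what changed: A dispatches by an ordered chain of 14 first-match any() guards; B instead scans an alphabetical keyword->priority inverted index once, keeping the minimal matching priority, and looks the icon up in a priority-indexed list, so table order is immaterial and no early exit exists.
import Mathlib
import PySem

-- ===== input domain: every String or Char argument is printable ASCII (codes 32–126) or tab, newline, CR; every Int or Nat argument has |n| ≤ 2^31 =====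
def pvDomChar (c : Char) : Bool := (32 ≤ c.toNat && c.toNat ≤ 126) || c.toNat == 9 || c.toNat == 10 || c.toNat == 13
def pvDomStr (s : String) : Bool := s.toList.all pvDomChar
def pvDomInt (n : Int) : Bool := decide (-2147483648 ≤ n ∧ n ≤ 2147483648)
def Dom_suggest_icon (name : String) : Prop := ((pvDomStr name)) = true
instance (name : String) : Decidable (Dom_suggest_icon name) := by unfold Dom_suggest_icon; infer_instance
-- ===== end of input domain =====

-- B replaces A's ordered first-match rule chain by an order-independent scan of an
-- alphabetical keyword→priority index keeping the minimal matching priority (objective: alternative).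

-- ===== PORT A =====
def suggest_icon (name : String) : String :=
  let n := PySem.Str.lower (if name == "" then "" else name)
  if (["entrada", "bruschetta", "pao", "camar", "polvo"].any (fun k => PySem.Str.isIn k n)) then "bi-egg"
  else if (["sobremesa", "sobremesas", "doce", "torta", "sorvete", "pudim", "chocolate"].any (fun k => PySem.Str.isIn k n)) then "bi-cup-hot"
  else if (["salada", "saladas", "folha", "veg", "burrata"].any (fun k => PySem.Str.isIn k n)) then "bi-flower1"
  else if (["bovino", "carne", "cortes", "steak", "picanha", "maminha", "ancho", "rib", "denver", "parrilla", "parrila"].any (fun k => PySem.Str.isIn k n)) then "bi-fire"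
  else if (["peixe", "salm", "frutos do mar", "polvo"].any (fun k => PySem.Str.isIn k n)) then "bi-fish"
  else if (["ave", "frango", "galetinho"].any (fun k => PySem.Str.isIn k n)) then "bi-egg"
  else if (["suin", "porco", "barriga", "prime rib su"].any (fun k => PySem.Str.isIn k n)) then "bi-pig"
  else if (["lingui", "embutido"].any (fun k => PySem.Str.isIn k n)) then "bi-emoji-smile"
  else if (["acompanh", "guarni", "side"].any (fun k => PySem.Str.isIn k n)) then "bi-basket"
  else if (["kids", "infantil"].any (fun k => PySem.Str.isIn k n)) then "bi-emoji-smile"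
  else if (["lanche", "burger", "sand"].any (fun k => PySem.Str.isIn k n)) then "bi-bag"
  else if (["executivo", "prato do dia"].any (fun k => PySem.Str.isIn k n)) then "bi-briefcase"
  else if (["wagyu"].any (fun k => PySem.Str.isIn k n)) then "bi-gem"
  else if (["compartilhar", "tabua", "familia"].any (fun k => PySem.Str.isIn k n)) then "bi-people"
  else "bi-grid-3x3-gap"

-- ===== PORT B =====
def pvIcons : List String :=
  ["bi-egg", "bi-cup-hot", "bi-flower1", "bi-fire", "bi-fish", "bi-egg",
   "bi-pig", "bi-emoji-smile", "bi-basket", "bi-emoji-smile", "bi-bag",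
   "bi-briefcase", "bi-gem", "bi-people"]

-- keyword → priority, alphabetical (order immaterial for B's min-scan)
def pvKeywordPriority : List (String × Nat) :=
  [ ("acompanh", 8), ("ancho", 3), ("ave", 5), ("barriga", 6), ("bovino", 3),
    ("bruschetta", 0), ("burger", 10), ("burrata", 2), ("camar", 0), ("carne", 3),
    ("chocolate", 1), ("compartilhar", 13), ("cortes", 3), ("denver", 3), ("doce", 1),
    ("embutido", 7), ("entrada", 0), ("executivo", 11), ("familia", 13), ("folha", 2),
    ("frango", 5), ("frutos do mar", 4), ("galetinho", 5), ("guarni", 8), ("infantil", 9),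
    ("kids", 9), ("lanche", 10), ("lingui", 7), ("maminha", 3), ("pao", 0),
    ("parrila", 3), ("parrilla", 3), ("peixe", 4), ("picanha", 3), ("polvo", 0),
    ("polvo", 4), ("porco", 6), ("prato do dia", 11), ("prime rib su", 6), ("pudim", 1),
    ("rib", 3), ("salada", 2), ("saladas", 2), ("salm", 4), ("sand", 10),
    ("side", 8), ("sobremesa", 1), ("sobremesas", 1), ("sorvete", 1), ("steak", 3),
    ("suin", 6), ("tabua", 13), ("torta", 1), ("veg", 2), ("wagyu", 12) ]

def suggest_icon_alt (name : String) : String :=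
  let n := PySem.Str.lower (if name == "" then "" else name)
  let best := pvKeywordPriority.foldl
    (fun b p => if PySem.Str.isIn p.1 n && decide (p.2 < b) then p.2 else b) pvIcons.length
  if best < pvIcons.length then pvIcons.getD best "" else "bi-grid-3x3-gap"

-- ===== PRECONDITION & SPEC =====
def Spec_suggest_icon (name : String) (out : String) : Prop := out = suggest_icon_alt name
instance (name : String) (out : String) : Decidable (Spec_suggest_icon name out) := by unfold Spec_suggest_icon; infer_instance

-- ===== CLAIM (what is proved, stated in full; the proofs are below) =====
def Claim_equal_suggest_icon : Prop := ∀ (name : String), Dom_suggest_icon name → Spec_suggest_icon name (suggest_icon name)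

-- ===== LEMMAS AND PROOFS =====

-- A's rule table and its first-match chain (proof-side model of A)
def pvRules : List (List String × String) :=
  [ (["entrada", "bruschetta", "pao", "camar", "polvo"], "bi-egg"),
    (["sobremesa", "sobremesas", "doce", "torta", "sorvete", "pudim", "chocolate"], "bi-cup-hot"),
    (["salada", "saladas", "folha", "veg", "burrata"], "bi-flower1"),
    (["bovino", "carne", "cortes", "steak", "picanha", "maminha", "ancho", "rib", "denver", "parrilla", "parrila"], "bi-fire"),
    (["peixe", "salm", "frutos do mar", "polvo"], "bi-fish"),
    (["ave", "frango", "galetinho"], "bi-egg"),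
    (["suin", "porco", "barriga", "prime rib su"], "bi-pig"),
    (["lingui", "embutido"], "bi-emoji-smile"),
    (["acompanh", "guarni", "side"], "bi-basket"),
    (["kids", "infantil"], "bi-emoji-smile"),
    (["lanche", "burger", "sand"], "bi-bag"),
    (["executivo", "prato do dia"], "bi-briefcase"),
    (["wagyu"], "bi-gem"),
    (["compartilhar", "tabua", "familia"], "bi-people") ]

def pvChain : List (List String × String) → String → String
  | [], _ => "bi-grid-3x3-gap"
  | (ks, icon) :: rs, n => if ks.any (fun k => PySem.Str.isIn k n) then icon else pvChain rs n

-- flattened (keyword, rule index) pairs in rule order, indices starting at i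
def pvFlat : List (List String × String) → Nat → List (String × Nat)
  | [], _ => []
  | (ks, _) :: rs, i => ks.map (fun k => (k, i)) ++ pvFlat rs (i + 1)

-- B's accumulator step
def pvG (n : String) : Nat → String × Nat → Nat :=
  fun b p => if PySem.Str.isIn p.1 n && decide (p.2 < b) then p.2 else b

theorem pvG_min (n : String) (b : Nat) (p : String × Nat) :
    pvG n b p = if PySem.Str.isIn p.1 n then min b p.2 else b := by
  unfold pvG
  cases h : PySem.Str.isIn p.1 n
  · simp
  · simp only [Bool.true_and, decide_eq_true_eq]
    rw [Nat.min_def]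
    split_ifs <;> omega

theorem pvG_rcomm (n : String) (b : Nat) (p q : String × Nat) :
    pvG n (pvG n b p) q = pvG n (pvG n b q) p := by
  simp only [pvG_min]
  split_ifs <;> simp [Nat.min_comm, Nat.min_left_comm]

-- fold result never drops below a common lower bound of the start and all indices
theorem pvFold_ge (n : String) (L : List (String × Nat)) (m : Nat) :
    ∀ b, m ≤ b → (∀ p ∈ L, m ≤ p.2) → m ≤ L.foldl (pvG n) b := by
  induction L with
  | nil => intro b hb _; simpa using hb
  | cons p L ih =>
      intro b hb hL
      simp only [List.foldl_cons]
      refine ih _ ?_ (fun q hq => hL q (List.mem_cons_of_mem _ hq))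
      rw [pvG_min]
      have := hL p (List.mem_cons_self ..)
      split_ifs <;> omega

-- if the start is ≤ every index, the fold is constant
theorem pvFold_const (n : String) (L : List (String × Nat)) :
    ∀ b, (∀ p ∈ L, b ≤ p.2) → L.foldl (pvG n) b = b := by
  induction L with
  | nil => intro b _; rfl
  | cons p L ih =>
      intro b hL
      simp only [List.foldl_cons]
      have hb : pvG n b p = b := by
        rw [pvG_min]
        have := hL p (List.mem_cons_self ..)
        split_ifs <;> omega
      rw [hb]
      exact ih b (fun q hq => hL q (List.mem_cons_of_mem _ hq))

theorem pvFlat_idx_ge (rs : List (List String × String)) :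
    ∀ i, ∀ p ∈ pvFlat rs i, i ≤ p.2 := by
  induction rs with
  | nil => intro i p hp; simp [pvFlat] at hp
  | cons r rs ih =>
      intro i p hp
      obtain ⟨ks, icon⟩ := r
      simp only [pvFlat, List.mem_append, List.mem_map] at hp
      rcases hp with ⟨k, _, rfl⟩ | hp
      · exact Nat.le_refl i
      · exact Nat.le_of_succ_le (ih (i + 1) p hp)

-- one rule group's keywords fold to min b i iff some keyword matches
theorem pvFold_group (n : String) (ks : List String) (i : Nat) :
    ∀ b, (ks.map (fun k => (k, i))).foldl (pvG n) b
      = if ks.any (fun k => PySem.Str.isIn k n) then min b i else b := by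
  induction ks with
  | nil => intro b; simp
  | cons k ks ih =>
      intro b
      simp only [List.map_cons, List.foldl_cons, List.any_cons, pvG_min]
      by_cases h : PySem.Str.isIn k n = true
      · simp only [h, Bool.true_or, if_true, ih]
        split_ifs <;> simp [Nat.min_comm]
      · rw [Bool.not_eq_true] at h
        simp only [h, Bool.false_or, Bool.false_eq_true, if_false, ih]

-- the min-fold over the flattened ordered table realises the first-match chain
theorem pvKey (n d : String) (rs : List (List String × String)) :
    ∀ i, (if (pvFlat rs i).foldl (pvG n) (i + rs.length) < i + rs.length
      then (rs.map Prod.snd).getD ((pvFlat rs i).foldl (pvG n) (i + rs.length) - i) d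
      else "bi-grid-3x3-gap") = pvChain rs n := by
  induction rs with
  | nil => intro i; simp [pvFlat, pvChain]
  | cons r rs ih =>
      intro i
      obtain ⟨ks, icon⟩ := r
      simp only [pvFlat, pvChain, List.foldl_append, pvFold_group, List.length_cons, List.map_cons]
      by_cases h : ks.any (fun k => PySem.Str.isIn k n) = true
      · simp only [h, if_true]
        have hmin : min (i + (rs.length + 1)) i = i := by omega
        rw [hmin, pvFold_const n _ i (fun p hp => Nat.le_of_succ_le (pvFlat_idx_ge rs (i + 1) p hp))]
        simp only [Nat.sub_self, show i < i + (rs.length + 1) by omega, if_true, List.getD_cons_zero]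
      · rw [Bool.not_eq_true] at h
        simp only [h, Bool.false_eq_true, if_false]
        have harith : i + (rs.length + 1) = (i + 1) + rs.length := by omega
        rw [harith]
        have hge : i + 1 ≤ (pvFlat rs (i + 1)).foldl (pvG n) ((i + 1) + rs.length) :=
          pvFold_ge n _ (i + 1) _ (by omega) (pvFlat_idx_ge rs (i + 1))
        have := ih (i + 1)
        by_cases hlt : (pvFlat rs (i + 1)).foldl (pvG n) ((i + 1) + rs.length) < (i + 1) + rs.length
        · simp only [hlt, if_true] at this ⊢
          rw [show (pvFlat rs (i + 1)).foldl (pvG n) ((i + 1) + rs.length) - i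
              = ((pvFlat rs (i + 1)).foldl (pvG n) ((i + 1) + rs.length) - (i + 1)) + 1 by omega,
            List.getD_cons_succ]
          exact this
        · simp only [hlt, if_false] at this ⊢
          exact this

-- ===== VERDICT (by name: the statement is the Claim_ definition above) =====
theorem suggest_icon_spec : Claim_equal_suggest_icon := by
  intro name _
  unfold Spec_suggest_icon suggest_icon suggest_icon_alt
  generalize PySem.Str.lower (if name == "" then "" else name) = n
  have hperm : (pvKeywordPriority).Perm (pvFlat pvRules 0) := by decide
  have hfold : pvKeywordPriority.foldl (pvG n) 14 = (pvFlat pvRules 0).foldl (pvG n) (0 + pvRules.length) :=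
    hperm.foldl_eq (rcomm := ⟨fun b p q => pvG_rcomm n b p q⟩) 14
  have hkey := pvKey n "" pvRules 0
  rw [show pvIcons.length = 14 from rfl]
  show (if _ then _ else _) = (if pvKeywordPriority.foldl (pvG n) 14 < 14 then
      pvIcons.getD (pvKeywordPriority.foldl (pvG n) 14) "" else "bi-grid-3x3-gap")
  rw [hfold]
  rw [show (0 + pvRules.length) = 14 from rfl] at hkey ⊢
  rw [show pvIcons = pvRules.map Prod.snd from rfl]
  simp only [Nat.sub_zero] at hkey
  rw [hkey]
  simp only [pvChain, pvRules]
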